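-- pv_equiv track=rewrite | github.com/awookaze/Crypto1_RSA_Fok | project_01_01/test_prime.py | hex_to_int_unusual_format
-- ===== SOURCE A (Python) =====
-- def hex_to_int_unusual_format(hex_string):
--     """
--     Convert hex string to integer using the unusual format from the task description.
--     Format: (h_0*16^0 + h_1*16^1 + ... + h_k*16^k)
--     where h_0 is the FIRST character (leftmost).
--
--     Example: "B5" = B*16^0 + 5*16^1 = 11*1 + 5*16 = 11 + 80 = 91
--     """
--     hex_string = hex_string.strip().upper()
--
--     if not hex_string:
--         return 0
--
--     result = 0
--     for i, char in enumerate(hex_string):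
--         if '0' <= char <= '9':
--             digit = ord(char) - ord('0')
--         elif 'A' <= char <= 'F':
--             digit = ord(char) - ord('A') + 10
--         else:
--             continue  # Skip invalid characters
--
--         result += digit * (16 ** i)
--
--     return result
-- ===== SOURCE B (Python) =====
-- def hex_to_int_unusual_format(hex_string):
--     s = hex_string.strip().upper()
--     result = 0
--     for char in reversed(s):
--         if '0' <= char <= '9':
--             digit = ord(char) - ord('0')
--         elif 'A' <= char <= 'F':
--             digit = ord(char) - ord('A') + 10
--         else:
--             digit = 0  # invalid char contributes 0 but keeps its power position
--         result = result * 16 + digit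
--     return result
-- ===== Notes on version B (the rewrite author's own statement) =====
-- stated objective: faster
-- what changed: Replaces the per-position 16**i power computation over enumerate with Horner's method over the reversed string (result = result*16 + digit), treating invalid characters as digit 0 so positions stay aligned.
import Mathlib
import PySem

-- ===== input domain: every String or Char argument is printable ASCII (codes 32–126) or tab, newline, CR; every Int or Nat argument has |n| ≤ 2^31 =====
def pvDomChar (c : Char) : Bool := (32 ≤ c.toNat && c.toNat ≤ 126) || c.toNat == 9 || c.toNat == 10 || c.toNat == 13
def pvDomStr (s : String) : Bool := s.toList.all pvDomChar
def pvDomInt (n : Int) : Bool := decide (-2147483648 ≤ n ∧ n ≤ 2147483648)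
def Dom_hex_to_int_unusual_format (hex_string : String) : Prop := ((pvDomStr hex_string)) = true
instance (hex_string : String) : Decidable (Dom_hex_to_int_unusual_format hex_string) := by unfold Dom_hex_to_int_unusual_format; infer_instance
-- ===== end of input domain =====

-- B replaces A's per-position 16**i powers over enumerate with Horner's method on the
-- reversed string (invalid characters contribute digit 0, keeping power positions aligned).

-- ===== PORT A =====
-- literal transliteration: strip+upper, guard on empty, loop over enumerate adding
-- digit * 16**i, skipping invalid characters (branch order preserved)
def hex_to_int_unusual_format (hex_string : String) : Int :=
  let s := PySem.Str.upper (PySem.Str.strip hex_string)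
  if s.toList = [] then 0
  else
    (PySem.List.enumerate s.toList 0).foldl
      (fun result ic =>
        if '0' ≤ ic.2 ∧ ic.2 ≤ '9' then
          result + ((ic.2.toNat : Int) - ('0'.toNat : Int)) * 16 ^ ic.1.toNat
        else if 'A' ≤ ic.2 ∧ ic.2 ≤ 'F' then
          result + ((ic.2.toNat : Int) - ('A'.toNat : Int) + 10) * 16 ^ ic.1.toNat
        else result) 0

-- ===== PORT B =====
def pvHexDigit (c : Char) : Int :=
  if '0' ≤ c ∧ c ≤ '9' then (c.toNat : Int) - ('0'.toNat : Int)
  else if 'A' ≤ c ∧ c ≤ 'F' then (c.toNat : Int) - ('A'.toNat : Int) + 10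
  else 0

def hex_to_int_unusual_format_alt (hex_string : String) : Int :=
  let s := PySem.Str.upper (PySem.Str.strip hex_string)
  s.toList.reverse.foldl (fun r c => r * 16 + pvHexDigit c) 0

-- ===== PRECONDITION & SPEC =====
def Spec_hex_to_int_unusual_format (hex_string : String) (out : Int) : Prop := out = hex_to_int_unusual_format_alt hex_string
instance (hex_string : String) (out : Int) : Decidable (Spec_hex_to_int_unusual_format hex_string out) := by unfold Spec_hex_to_int_unusual_format; infer_instance

-- ===== CLAIM (what is proved, stated in full; the proofs are below) =====
def Claim_equal_hex_to_int_unusual_format : Prop := ∀ (hex_string : String), Dom_hex_to_int_unusual_format hex_string → Spec_hex_to_int_unusual_format hex_string (hex_to_int_unusual_format hex_string)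

-- ===== LEMMAS AND PROOFS =====

-- value of the digit polynomial Σ_j pvHexDigit l[j] * 16^j, lowest power first
def pvPoly : List Char → Int
  | [] => 0
  | c :: t => pvHexDigit c + 16 * pvPoly t

theorem pvFoldA_eq (l : List Char) : ∀ (k : Nat) (res : Int),
    (PySem.List.enumerate l (k : Int)).foldl
      (fun result ic =>
        if '0' ≤ ic.2 ∧ ic.2 ≤ '9' then
          result + ((ic.2.toNat : Int) - ('0'.toNat : Int)) * 16 ^ ic.1.toNat
        else if 'A' ≤ ic.2 ∧ ic.2 ≤ 'F' then
          result + ((ic.2.toNat : Int) - ('A'.toNat : Int) + 10) * 16 ^ ic.1.toNat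
        else result) res
      = res + 16 ^ k * pvPoly l := by
  induction l with
  | nil => intro k res; simp [PySem.List.enumerate, pvPoly]
  | cons c t ih =>
    intro k res
    rw [PySem.List.enumerate_cons, List.foldl_cons]
    have hk : ((k : Int) + 1) = ((k + 1 : Nat) : Int) := by push_cast; ring
    rw [hk, ih (k + 1)]
    have htn : ((k : Int)).toNat = k := Int.toNat_natCast k
    simp only [pvPoly, pvHexDigit, htn]
    split_ifs with h1 h2 <;> ring

theorem pvFoldB_eq (l : List Char) : ∀ (r : Int),
    l.reverse.foldl (fun r c => r * 16 + pvHexDigit c) r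
      = r * 16 ^ l.length + pvPoly l := by
  induction l with
  | nil => intro r; simp [pvPoly]
  | cons c t ih =>
    intro r
    simp only [List.reverse_cons, List.foldl_append, List.foldl_cons, List.foldl_nil, ih]
    simp only [pvPoly, List.length_cons]
    ring

theorem pvMain (l : List Char) :
    (if l = [] then 0 else
      (PySem.List.enumerate l 0).foldl
        (fun result ic =>
          if '0' ≤ ic.2 ∧ ic.2 ≤ '9' then
            result + ((ic.2.toNat : Int) - ('0'.toNat : Int)) * 16 ^ ic.1.toNat
          else if 'A' ≤ ic.2 ∧ ic.2 ≤ 'F' then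
            result + ((ic.2.toNat : Int) - ('A'.toNat : Int) + 10) * 16 ^ ic.1.toNat
          else result) 0)
      = l.reverse.foldl (fun r c => r * 16 + pvHexDigit c) 0 := by
  by_cases h : l = []
  · subst h; rfl
  · rw [if_neg h, pvFoldB_eq l 0]
    have hA := pvFoldA_eq l 0 0
    norm_num at hA ⊢
    exact hA

-- ===== VERDICT (by name: the statement is the Claim_ definition above) =====
theorem hex_to_int_unusual_format_spec : Claim_equal_hex_to_int_unusual_format := by
  intro hex_string _
  unfold Spec_hex_to_int_unusual_format hex_to_int_unusual_format hex_to_int_unusual_format_alt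
  exact (pvMain ((PySem.Str.upper (PySem.Str.strip hex_string)).toList)).symm ▸ rfl
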